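-- pv_equiv track=rewrite | github.com/muhammadGagah/VisionAssistantPro | addon/globalPlugins/visionAssistant/__init__.py | parse_custom_prompts_legacy
-- ===== SOURCE A (Python) =====
-- def parse_custom_prompts_legacy(raw_value):
--     items = []
--     if not raw_value:
--         return items
--
--     normalized = raw_value.replace("\r\n", "\n").replace("\r", "\n")
--     for line in normalized.split("\n"):
--         for segment in line.split("|"):
--             segment = segment.strip()
--             if not segment or ":" not in segment:
--                 continue
--             name, content = segment.split(":", 1)
--             name = name.strip()
--             content = content.strip()
--             if name and content:
--                 items.append({"name": name, "content": content})
--     return items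
-- ===== SOURCE B (Python) =====
-- def parse_custom_prompts_legacy(raw_value):
--     # Single flat character scan with a sentinel delimiter, instead of
--     # normalize-then-nested-splits.
--     items = []
--     seg = []
--     for ch in raw_value + "\n":  # trailing sentinel flushes the last segment
--         if ch in "\r\n|":
--             segment = "".join(seg).strip()
--             seg = []
--             if segment and ":" in segment:
--                 name, content = segment.split(":", 1)
--                 name = name.strip()
--                 content = content.strip()
--                 if name and content:
--                     items.append({"name": name, "content": content})
--         else:
--             seg.append(ch)
--     return items
-- ===== Notes on version B (the rewrite author's own statement) =====
-- stated objective: simpler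
-- what changed: Replaces the normalize-with-two-replaces-then-nested-split structure by one flat character scan that accumulates the current segment and flushes it at every delimiter character (carriage return, line feed or pipe; a trailing sentinel delimiter flushes the last segment), parsing each flushed segment once.
import Mathlib
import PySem

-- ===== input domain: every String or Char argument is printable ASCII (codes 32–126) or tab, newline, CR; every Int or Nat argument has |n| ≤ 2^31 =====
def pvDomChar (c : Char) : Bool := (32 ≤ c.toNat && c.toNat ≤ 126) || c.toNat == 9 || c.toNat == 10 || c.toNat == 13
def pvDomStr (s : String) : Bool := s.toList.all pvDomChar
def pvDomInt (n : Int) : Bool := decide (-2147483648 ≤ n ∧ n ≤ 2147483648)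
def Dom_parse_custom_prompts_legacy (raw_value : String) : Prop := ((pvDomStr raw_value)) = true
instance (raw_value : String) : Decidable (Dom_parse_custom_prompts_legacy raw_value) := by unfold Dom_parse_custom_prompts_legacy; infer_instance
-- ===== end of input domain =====

-- B replaces A's normalize-with-replaces-then-nested-splits by a single flat character scan (objective: simpler; same return values).

-- ===== PORT A =====
-- A-side helper: the body of A's inner loop (parse one '|'-segment, maybe append one item)
def pvSegStepA (items : List (List (String × String))) (segment0 : String) :
    List (List (String × String)) :=
  if PySem.Str.strip segment0 = "" ∨ PySem.Str.isIn ":" (PySem.Str.strip segment0) = false then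
    items
  else
    match (PySem.Str.splitMax? (PySem.Str.strip segment0) ":" 1).getD [] with
    | [name0, content0] =>
      if PySem.Str.strip name0 ≠ "" ∧ PySem.Str.strip content0 ≠ "" then
        items ++ [[("name", PySem.Str.strip name0), ("content", PySem.Str.strip content0)]]
      else items
    | _ => items

-- A-side helper: the body of A's outer loop (split one line on '|' and run the inner loop)
def pvLineA (items : List (List (String × String))) (line : String) :
    List (List (String × String)) :=
  ((PySem.Str.split? line "|").getD []).foldl pvSegStepA items

def parse_custom_prompts_legacy (raw_value : String) : List (List (String × String)) :=
  let items : List (List (String × String)) := []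
  if raw_value = "" then items
  else
    let normalized := PySem.Str.replace (PySem.Str.replace raw_value "\r\n" "\n") "\r" "\n"
    ((PySem.Str.split? normalized "\n").getD []).foldl pvLineA items

-- ===== PORT B =====
-- B-side helper: flush one accumulated segment ("".join(seg).strip(), parse it)
def pvFlushB (items : List (List (String × String))) (seg : List Char) :
    List (List (String × String)) :=
  if PySem.Str.strip (String.ofList seg) ≠ "" ∧
      PySem.Str.isIn ":" (PySem.Str.strip (String.ofList seg)) = true then
    match (PySem.Str.splitMax? (PySem.Str.strip (String.ofList seg)) ":" 1).getD [] with
    | [name0, content0] =>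
      if PySem.Str.strip name0 ≠ "" ∧ PySem.Str.strip content0 ≠ "" then
        items ++ [[("name", PySem.Str.strip name0), ("content", PySem.Str.strip content0)]]
      else items
    | _ => items
  else items

-- B-side helper: the flat scan (for ch in …: if ch in "\r\n|": flush else: seg.append(ch))
def pvGoB (items : List (List (String × String))) (seg : List Char) :
    List Char → List (List (String × String))
  | [] => items
  | c :: rest =>
    if c = '\r' ∨ c = '\n' ∨ c = '|' then pvGoB (pvFlushB items seg) [] rest
    else pvGoB items (seg ++ [c]) rest

def parse_custom_prompts_legacy_alt (raw_value : String) : List (List (String × String)) :=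
  pvGoB [] [] (raw_value.toList ++ ['\n'])

-- ===== PRECONDITION & SPEC =====
def Spec_parse_custom_prompts_legacy (raw_value : String) (out : List (List (String × String))) : Prop := out = parse_custom_prompts_legacy_alt raw_value
instance (raw_value : String) (out : List (List (String × String))) : Decidable (Spec_parse_custom_prompts_legacy raw_value out) := by unfold Spec_parse_custom_prompts_legacy; infer_instance

-- ===== CLAIM (what is proved, stated in full; the proofs are below) =====
def Claim_equal_parse_custom_prompts_legacy : Prop := ∀ (raw_value : String), Dom_parse_custom_prompts_legacy raw_value → Spec_parse_custom_prompts_legacy raw_value (parse_custom_prompts_legacy raw_value)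

-- ===== LEMMAS AND PROOFS =====

-- the contribution of a single segment, as a list of characters
def pvItems (l : List Char) : List (List (String × String)) := pvFlushB [] l

lemma pvFlushB_eq (items : List (List (String × String))) (l : List Char) :
    pvFlushB items l = items ++ pvItems l := by
  unfold pvItems pvFlushB
  by_cases hg : PySem.Str.strip (String.ofList l) ≠ "" ∧
      PySem.Str.isIn ":" (PySem.Str.strip (String.ofList l)) = true
  · rw [if_pos hg, if_pos hg]
    rcases h : (PySem.Str.splitMax? (PySem.Str.strip (String.ofList l)) ":" 1).getD [] with
      _ | ⟨n, _ | ⟨c2, _ | ⟨x, xs⟩⟩⟩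
    · simp
    · simp
    · by_cases hP : PySem.Str.strip n ≠ "" ∧ PySem.Str.strip c2 ≠ "" <;> simp [hP]
    · simp
  · rw [if_neg hg, if_neg hg]
    simp

lemma pvSegStepA_eq (items : List (List (String × String))) (seg : String) :
    pvSegStepA items seg = pvFlushB items seg.toList := by
  unfold pvSegStepA pvFlushB
  have hof : String.ofList seg.toList = seg := by simp
  rw [hof]
  by_cases hs : PySem.Str.strip seg = ""
  · rw [if_pos (Or.inl hs), if_neg (fun hcon => hcon.1 hs)]
  · by_cases hi : PySem.Str.isIn ":" (PySem.Str.strip seg) = true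
    · rw [if_neg (by
        rintro (h | h)
        · exact hs h
        · rw [h] at hi; exact absurd hi (by decide)), if_pos ⟨hs, hi⟩]
    · rw [Bool.not_eq_true] at hi
      rw [if_pos (Or.inr hi), if_neg (by
        rintro ⟨_, h⟩
        rw [h] at hi; exact absurd hi (by decide))]

-- canonical char-level versions of A's pipeline
def pvRepCRLF : List Char → List Char
  | [] => []
  | [c] => [c]
  | c :: d :: t => if c = '\r' ∧ d = '\n' then '\n' :: pvRepCRLF t else c :: pvRepCRLF (d :: t)

def pvRepCR : List Char → List Char
  | [] => []
  | c :: t => (if c = '\r' then '\n' else c) :: pvRepCR t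

def pvSplitC (d : Char) : List Char → List (List Char)
  | [] => [[]]
  | c :: t =>
    if c = d then [] :: pvSplitC d t
    else match pvSplitC d t with
         | h :: r => (c :: h) :: r
         | [] => [[c]]

def pvSplitD : List Char → List (List Char)
  | [] => [[]]
  | c :: t =>
    if c = '\r' ∨ c = '\n' ∨ c = '|' then [] :: pvSplitD t
    else match pvSplitD t with
         | h :: r => (c :: h) :: r
         | [] => [[c]]

def pvPrepend (p : List Char) : List (List Char) → List (List Char)
  | [] => [p]
  | h :: r => (p ++ h) :: r

lemma pvPrepend_nil (L : List (List Char)) (h : L ≠ []) : pvPrepend [] L = L := by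
  cases L with
  | nil => exact absurd rfl h
  | cons a r => simp [pvPrepend]

lemma pvSplitC_ne_nil (d : Char) (l : List Char) : pvSplitC d l ≠ [] := by
  cases l with
  | nil => simp [pvSplitC]
  | cons c t =>
    simp only [pvSplitC]
    split
    · simp
    · split <;> simp

lemma pvSplitD_ne_nil (l : List Char) : pvSplitD l ≠ [] := by
  cases l with
  | nil => simp [pvSplitD]
  | cons c t =>
    simp only [pvSplitD]
    split
    · simp
    · split <;> simp

lemma pvRepCRLF_cons (c : Char) (t : List Char) (hc : c ≠ '\r') :
    pvRepCRLF (c :: t) = c :: pvRepCRLF t := by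
  cases t <;> simp [pvRepCRLF, hc]

-- PySem.Chars.replace with old = "\r\n" is pvRepCRLF
lemma pvReplace_go_crlf : ∀ (fuel : Nat) (l acc : List Char), l.length ≤ fuel →
    PySem.Chars.replace.go ['\r', '\n'] ['\n'] fuel l acc = acc.reverse ++ pvRepCRLF l := by
  intro fuel
  induction fuel with
  | zero =>
    intro l acc h
    have : l = [] := by simpa using h
    subst this
    rw [PySem.Chars.replace.go]
    simp [pvRepCRLF]
  | succ f ih =>
    intro l acc h
    match l with
    | [] =>
      rw [PySem.Chars.replace.go] <;> simp [pvRepCRLF]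
    | [c] =>
      have hpre : (['\r', '\n'].isPrefixOf [c]) = false := by
        simp [List.isPrefixOf]
      rw [PySem.Chars.replace.go]
      simp only [hpre, Bool.false_eq_true, if_false]
      rw [ih [] (c :: acc) (by simp)]
      simp [pvRepCRLF]
    | c :: d :: t =>
      by_cases hc : c = '\r' ∧ d = '\n'
      · obtain ⟨h1, h2⟩ := hc
        subst h1; subst h2
        have hpre : (['\r', '\n'].isPrefixOf ('\r' :: '\n' :: t)) = true := by
          simp [List.isPrefixOf]
        rw [PySem.Chars.replace.go]
        simp only [hpre, if_true]
        have ht : t.length ≤ f := by simp at h; omega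
        rw [show List.drop (['\r', '\n'] : List Char).length ('\r' :: '\n' :: t) = t from rfl,
            show (['\n'] : List Char).reverse ++ acc = '\n' :: acc from rfl,
            ih t ('\n' :: acc) ht]
        simp [pvRepCRLF]
      · have hpre : (['\r', '\n'].isPrefixOf (c :: d :: t)) = false := by
          simp [List.isPrefixOf]
          exact fun a b => hc ⟨a.symm, b.symm⟩
        rw [PySem.Chars.replace.go]
        simp only [hpre, Bool.false_eq_true, if_false]
        rw [ih (d :: t) (c :: acc) (by simp at h ⊢; omega)]
        simp [pvRepCRLF, hc]

lemma pvReplace_crlf (l : List Char) :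
    PySem.Chars.replace l ['\r', '\n'] ['\n'] = pvRepCRLF l := by
  unfold PySem.Chars.replace
  simp only [List.isEmpty_cons, Bool.false_eq_true, if_false]
  rw [pvReplace_go_crlf l.length l [] le_rfl]
  simp

lemma pvReplace_go_cr : ∀ (fuel : Nat) (l acc : List Char), l.length ≤ fuel →
    PySem.Chars.replace.go ['\r'] ['\n'] fuel l acc = acc.reverse ++ pvRepCR l := by
  intro fuel
  induction fuel with
  | zero =>
    intro l acc h
    have : l = [] := by simpa using h
    subst this
    rw [PySem.Chars.replace.go]
    simp [pvRepCR]
  | succ f ih =>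
    intro l acc h
    match l with
    | [] =>
      rw [PySem.Chars.replace.go] <;> simp [pvRepCR]
    | c :: t =>
      by_cases hc : c = '\r'
      · subst hc
        have hpre : (['\r'].isPrefixOf ('\r' :: t)) = true := by simp [List.isPrefixOf]
        rw [PySem.Chars.replace.go]
        simp only [hpre, if_true]
        have ht : t.length ≤ f := by simp at h; omega
        rw [show List.drop (['\r'] : List Char).length ('\r' :: t) = t from rfl,
            show (['\n'] : List Char).reverse ++ acc = '\n' :: acc from rfl,
            ih t ('\n' :: acc) ht]
        simp [pvRepCR]
      · have hpre : (['\r'].isPrefixOf (c :: t)) = false := by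
          simp [List.isPrefixOf]
          exact fun a => hc a.symm
        rw [PySem.Chars.replace.go]
        simp only [hpre, Bool.false_eq_true, if_false]
        rw [ih t (c :: acc) (by simp at h ⊢; omega)]
        simp [pvRepCR, hc]

lemma pvReplace_cr (l : List Char) :
    PySem.Chars.replace l ['\r'] ['\n'] = pvRepCR l := by
  unfold PySem.Chars.replace
  simp only [List.isEmpty_cons, Bool.false_eq_true, if_false]
  rw [pvReplace_go_cr l.length l [] le_rfl]
  simp

-- PySem.Chars.splitOn with a single-char separator is pvSplitC
lemma pvSplitOn_go (d : Char) : ∀ (fuel : Nat) (l cur : List Char) (acc : List (List Char)),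
    l.length < fuel →
    PySem.Chars.splitOn.go [d] fuel l cur acc
      = acc.reverse ++ pvPrepend cur.reverse (pvSplitC d l) := by
  intro fuel
  induction fuel with
  | zero => intro l cur acc h; omega
  | succ f ih =>
    intro l cur acc h
    match l with
    | [] =>
      rw [PySem.Chars.splitOn.go] <;> simp [pvSplitC, pvPrepend]
    | c :: t =>
      by_cases hc : c = d
      · subst hc
        have hpre : ([c].isPrefixOf (c :: t)) = true := by simp [List.isPrefixOf]
        rw [PySem.Chars.splitOn.go]
        simp only [hpre, if_true]
        rw [show List.drop ([c] : List Char).length (c :: t) = t from rfl,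
            ih t [] (cur.reverse :: acc) (by simp at h ⊢; omega)]
        rcases hs : pvSplitC c t with _ | ⟨h1, r⟩
        · exact absurd hs (pvSplitC_ne_nil c t)
        · simp [pvSplitC, hs, pvPrepend]
      · have hpre : ([d].isPrefixOf (c :: t)) = false := by
          simp [List.isPrefixOf]
          exact fun a => hc a.symm
        rw [PySem.Chars.splitOn.go]
        simp only [hpre, Bool.false_eq_true, if_false]
        rw [ih t (c :: cur) acc (by simp at h ⊢; omega)]
        rcases hs : pvSplitC d t with _ | ⟨h1, r⟩
        · exact absurd hs (pvSplitC_ne_nil d t)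
        · simp [pvSplitC, hc, hs, pvPrepend]

lemma pvSplitOn_single (d : Char) (l : List Char) :
    PySem.Chars.splitOn l [d] = pvSplitC d l := by
  unfold PySem.Chars.splitOn
  rw [pvSplitOn_go d (l.length + 1) l [] [] (by omega)]
  rcases hs : pvSplitC d l with _ | ⟨h1, r⟩
  · exact absurd hs (pvSplitC_ne_nil d l)
  · simp [pvPrepend]

-- A's segment sequence at the character level
def pvNorm (l : List Char) : List Char := pvRepCR (pvRepCRLF l)

def pvSegsA (l : List Char) : List (List Char) :=
  (pvSplitC '\n' (pvNorm l)).flatMap (pvSplitC '|')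

lemma pvNorm_cons (c : Char) (t : List Char) (hc : c ≠ '\r') :
    pvNorm (c :: t) = c :: pvNorm t := by
  unfold pvNorm
  rw [pvRepCRLF_cons c t hc]
  simp [pvRepCR, hc]

lemma pvSegsA_delim_cons (x : List Char) (t : List Char)
    (hx : pvNorm x = '\n' :: pvNorm t) : pvSegsA x = [] :: pvSegsA t := by
  unfold pvSegsA
  rw [hx]
  simp [pvSplitC, List.flatMap_cons]

lemma pvSegsA_crlf (t : List Char) : pvSegsA ('\r' :: '\n' :: t) = [] :: pvSegsA t := by
  apply pvSegsA_delim_cons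
  unfold pvNorm
  have : pvRepCRLF ('\r' :: '\n' :: t) = '\n' :: pvRepCRLF t := by simp [pvRepCRLF]
  rw [this]
  simp [pvRepCR]

lemma pvSegsA_cr_single (d : Char) (t : List Char) (hd : d ≠ '\n') :
    pvSegsA ('\r' :: d :: t) = [] :: pvSegsA (d :: t) := by
  apply pvSegsA_delim_cons
  unfold pvNorm
  have : pvRepCRLF ('\r' :: d :: t) = '\r' :: pvRepCRLF (d :: t) := by simp [pvRepCRLF, hd]
  rw [this]
  simp [pvRepCR]

lemma pvSegsA_cr_nil : pvSegsA ['\r'] = [] :: pvSegsA [] := by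
  apply pvSegsA_delim_cons
  rfl

lemma pvSegsA_lf (t : List Char) : pvSegsA ('\n' :: t) = [] :: pvSegsA t := by
  apply pvSegsA_delim_cons
  exact pvNorm_cons '\n' t (by decide)

lemma pvSegsA_pipe (t : List Char) : pvSegsA ('|' :: t) = [] :: pvSegsA t := by
  unfold pvSegsA
  rw [pvNorm_cons '|' t (by decide)]
  rcases hs : pvSplitC '\n' (pvNorm t) with _ | ⟨h1, r⟩
  · exact absurd hs (pvSplitC_ne_nil _ _)
  · simp [pvSplitC, hs, List.flatMap_cons]

lemma pvSegsA_other (c : Char) (t : List Char)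
    (hc : ¬ (c = '\r' ∨ c = '\n' ∨ c = '|')) :
    ∃ h r, pvSegsA t = h :: r ∧ pvSegsA (c :: t) = (c :: h) :: r := by
  have h1 : c ≠ '\r' := fun e => hc (Or.inl e)
  have h2 : c ≠ '\n' := fun e => hc (Or.inr (Or.inl e))
  have h3 : c ≠ '|' := fun e => hc (Or.inr (Or.inr e))
  rcases hs : pvSplitC '\n' (pvNorm t) with _ | ⟨lh, lr⟩
  · exact absurd hs (pvSplitC_ne_nil _ _)
  · rcases hp : pvSplitC '|' lh with _ | ⟨sh, sr⟩
    · exact absurd hp (pvSplitC_ne_nil _ _)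
    · refine ⟨sh, sr ++ lr.flatMap (pvSplitC '|'), ?_, ?_⟩
      · unfold pvSegsA
        rw [hs]
        simp [List.flatMap_cons, hp]
      · unfold pvSegsA
        rw [pvNorm_cons c t h1]
        simp [pvSplitC, h2, h3, hs, hp, List.flatMap_cons]

lemma pvItems_nil : pvItems [] = [] := by decide

-- B's scan in closed form
lemma pvGoB_eq (cs : List Char) : ∀ (items : List (List (String × String))) (seg : List Char),
    pvGoB items seg cs = items ++ ((pvPrepend seg (pvSplitD cs)).dropLast).flatMap pvItems := by
  induction cs with
  | nil => intro items seg; simp [pvGoB, pvSplitD, pvPrepend]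
  | cons c rest ih =>
    intro items seg
    by_cases hc : c = '\r' ∨ c = '\n' ∨ c = '|'
    · rw [pvGoB, if_pos hc, ih, pvFlushB_eq]
      rcases hs : pvSplitD rest with _ | ⟨h1, r⟩
      · exact absurd hs (pvSplitD_ne_nil rest)
      · simp [pvSplitD, hc, hs, pvPrepend]
    · rw [pvGoB, if_neg hc, ih]
      rcases hs : pvSplitD rest with _ | ⟨h1, r⟩
      · exact absurd hs (pvSplitD_ne_nil rest)
      · simp [pvSplitD, hc, hs, pvPrepend]

lemma pvSplitD_append_delim (cs : List Char) :
    pvSplitD (cs ++ ['\n']) = pvSplitD cs ++ [[]] := by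
  induction cs with
  | nil => simp [pvSplitD]
  | cons c t ih =>
    by_cases hc : c = '\r' ∨ c = '\n' ∨ c = '|'
    · simp [pvSplitD, hc, ih]
    · rcases hs : pvSplitD t with _ | ⟨h1, r⟩
      · exact absurd hs (pvSplitD_ne_nil t)
      · simp [pvSplitD, hc, ih, hs]

lemma pvAlt_eq (raw_value : String) :
    parse_custom_prompts_legacy_alt raw_value = (pvSplitD raw_value.toList).flatMap pvItems := by
  unfold parse_custom_prompts_legacy_alt
  rw [pvGoB_eq, pvSplitD_append_delim, pvPrepend_nil _ (by simp), List.dropLast_concat]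
  simp

-- the heart: A's segment sequence and B's segment sequence agree under flatMap pvItems
lemma pvMain : ∀ (n : Nat) (cs : List Char), cs.length ≤ n →
    ∃ h tA tB, pvSegsA cs = h :: tA ∧ pvSplitD cs = h :: tB ∧
      tA.flatMap pvItems = tB.flatMap pvItems := by
  intro n
  induction n with
  | zero =>
    intro cs h
    have : cs = [] := by simpa using h
    subst this
    exact ⟨[], [], [], rfl, rfl, rfl⟩
  | succ n ih =>
    intro cs h
    match cs with
    | [] => exact ⟨[], [], [], rfl, rfl, rfl⟩
    | c :: t =>
      by_cases hc : c = '\r' ∨ c = '\n' ∨ c = '|'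
      · have hflat : ∀ (u : List Char), u.length ≤ n →
            (pvSegsA u).flatMap pvItems = (pvSplitD u).flatMap pvItems := by
          intro u hu
          obtain ⟨h', tA, tB, hA, hB, ht⟩ := ih u hu
          simp [hA, hB, ht]
        have hsplitD : pvSplitD (c :: t) = [] :: pvSplitD t := by
          simp [pvSplitD, hc]
        rcases hc with hc | hc | hc
        · subst hc
          match t with
          | [] =>
            refine ⟨[], pvSegsA [], [[]], pvSegsA_cr_nil, rfl, ?_⟩
            have : pvSegsA [] = [[]] := rfl
            rw [this]
          | '\n' :: t2 =>
            refine ⟨[], pvSegsA t2, [] :: pvSplitD t2, pvSegsA_crlf t2, by simp [pvSplitD], ?_⟩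
            rw [hflat t2 (by simp at h; omega)]
            simp [pvItems_nil]
          | d :: t2 =>
            by_cases hd : d = '\n'
            · subst hd
              refine ⟨[], pvSegsA t2, [] :: pvSplitD t2, pvSegsA_crlf t2, by simp [pvSplitD], ?_⟩
              rw [hflat t2 (by simp at h; omega)]
              simp [pvItems_nil]
            · refine ⟨[], pvSegsA (d :: t2), pvSplitD (d :: t2),
                pvSegsA_cr_single d t2 hd, hsplitD, ?_⟩
              exact hflat (d :: t2) (by simp at h ⊢; omega)
        · subst hc
          exact ⟨[], pvSegsA t, pvSplitD t, pvSegsA_lf t, hsplitD,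
            hflat t (by simp at h ⊢; omega)⟩
        · subst hc
          exact ⟨[], pvSegsA t, pvSplitD t, pvSegsA_pipe t, hsplitD,
            hflat t (by simp at h ⊢; omega)⟩
      · obtain ⟨hh, hr, hA1, hA2⟩ := pvSegsA_other c t hc
        obtain ⟨h', tA, tB, hA, hB, ht⟩ := ih t (by simp at h ⊢; omega)
        rw [hA] at hA1
        injection hA1 with e1 e2
        subst e1; subst e2
        refine ⟨c :: h', tA, tB, hA2, ?_, ht⟩
        simp [pvSplitD, hc, hB]

lemma pvFlat_eq (cs : List Char) :
    (pvSegsA cs).flatMap pvItems = (pvSplitD cs).flatMap pvItems := by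
  obtain ⟨h, tA, tB, hA, hB, ht⟩ := pvMain cs.length cs le_rfl
  simp [hA, hB, ht]

lemma pvLineA_eq (items : List (List (String × String))) (line : String) :
    pvLineA items line = items ++ (pvSplitC '|' line.toList).flatMap pvItems := by
  unfold pvLineA
  have hsp : (PySem.Str.split? line "|").getD []
      = (pvSplitC '|' line.toList).map String.ofList := by
    unfold PySem.Str.split?
    have hx : PySem.Chars.split? line.toList ("|" : String).toList
        = some (pvSplitC '|' line.toList) := by
      unfold PySem.Chars.split?
      rw [show ("|" : String).toList = ['|'] from rfl]
      simp [pvSplitOn_single]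
    rw [hx]
    simp
  rw [hsp, List.foldl_map]
  have hfun : (fun (x : List (List (String × String))) (y : List Char) =>
      pvSegStepA x (String.ofList y)) = (fun acc l => acc ++ pvItems l) := by
    funext acc y
    rw [pvSegStepA_eq]
    simp [pvFlushB_eq]
  rw [hfun, PySem.List.foldl_append_eq_flatMap]

lemma pvA_eq (raw_value : String) (hne : raw_value ≠ "") :
    parse_custom_prompts_legacy raw_value = (pvSegsA raw_value.toList).flatMap pvItems := by
  unfold parse_custom_prompts_legacy
  rw [if_neg hne]
  show List.foldl pvLineA []
      ((PySem.Str.split?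
        (PySem.Str.replace (PySem.Str.replace raw_value "\r\n" "\n") "\r" "\n") "\n").getD [])
      = (pvSegsA raw_value.toList).flatMap pvItems
  have hnorm : (PySem.Str.replace (PySem.Str.replace raw_value "\r\n" "\n") "\r" "\n").toList
      = pvNorm raw_value.toList := by
    rw [PySem.Str.toList_replace, PySem.Str.toList_replace]
    rw [show ("\r\n" : String).toList = ['\r', '\n'] from rfl,
        show ("\r" : String).toList = ['\r'] from rfl,
        show ("\n" : String).toList = ['\n'] from rfl]
    rw [pvReplace_crlf, pvReplace_cr]
    rfl
  have hsp : (PySem.Str.split?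
      (PySem.Str.replace (PySem.Str.replace raw_value "\r\n" "\n") "\r" "\n") "\n").getD []
      = (pvSplitC '\n' (pvNorm raw_value.toList)).map String.ofList := by
    unfold PySem.Str.split?
    have hx : PySem.Chars.split?
        (PySem.Str.replace (PySem.Str.replace raw_value "\r\n" "\n") "\r" "\n").toList
        ("\n" : String).toList = some (pvSplitC '\n' (pvNorm raw_value.toList)) := by
      unfold PySem.Chars.split?
      rw [show ("\n" : String).toList = ['\n'] from rfl, hnorm]
      simp [pvSplitOn_single]
    rw [hx]
    simp
  rw [hsp, List.foldl_map]
  have hfun : (fun (x : List (List (String × String))) (y : List Char) =>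
      pvLineA x (String.ofList y))
      = (fun acc l => acc ++ (pvSplitC '|' l).flatMap pvItems) := by
    funext acc y
    rw [pvLineA_eq]
    simp
  rw [hfun, PySem.List.foldl_append_eq_flatMap]
  unfold pvSegsA
  simp [List.flatMap_assoc]

-- ===== VERDICT (by name: the statement is the Claim_ definition above) =====
theorem parse_custom_prompts_legacy_spec : Claim_equal_parse_custom_prompts_legacy := by
  intro raw_value _
  unfold Spec_parse_custom_prompts_legacy
  by_cases h : raw_value = ""
  · subst h; decide
  · rw [pvA_eq raw_value h, pvAlt_eq, pvFlat_eq]
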